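-- pv_equiv track=rewrite | github.com/fberal/advent2015 | problem_benj.py | possib_k
-- ===== SOURCE A (Python) =====
-- def possib_k(k):
--     if k==0:
--         return []
--     elif k==1:
--         return [[2],[3]]
--     else:
--         possib = [[2],[3]]
--         for a in range(k-1):
--             add2 = [possib[i]+[2] for i in range(len(possib))]
--             add3 = [possib[i]+[3] for i in range(len(possib))]
--             possib = add2 + add3
--     return possib
-- ===== SOURCE B (Python) =====
-- def possib_k(k):
--     if k == 0:
--         return []
--     if k <= 1:
--         return [[2], [3]]
--     return [seq + [last] for last in (2, 3) for seq in possib_k(k - 1)]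
-- ===== Notes on version B (the rewrite author's own statement) =====
-- stated objective: alternative
-- what changed: Replaces A's bottom-up iterative doubling (k-1 rounds building add2/add3 index comprehensions over a mutated accumulator) by top-down structural recursion: possib_k(k) extends each sequence of possib_k(k-1) with 2 then with 3 in a single nested comprehension.
import Mathlib
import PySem

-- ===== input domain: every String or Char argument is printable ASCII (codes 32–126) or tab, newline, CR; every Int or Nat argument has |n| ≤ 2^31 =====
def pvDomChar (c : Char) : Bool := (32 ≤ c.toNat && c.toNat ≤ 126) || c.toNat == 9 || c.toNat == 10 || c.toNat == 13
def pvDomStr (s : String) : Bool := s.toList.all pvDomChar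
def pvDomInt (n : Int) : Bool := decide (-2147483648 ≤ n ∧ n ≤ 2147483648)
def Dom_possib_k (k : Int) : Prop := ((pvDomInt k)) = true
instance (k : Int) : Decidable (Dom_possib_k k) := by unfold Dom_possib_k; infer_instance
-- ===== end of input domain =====

-- B replaces A's bottom-up doubling loop by top-down structural recursion (alternative decomposition, same cost).

-- ===== PORT A =====
-- one doubling round: add2 ++ add3 ([possib[i]+[v] for i in range(len(possib))] = map over possib, exact)
def pvStep (possib : List (List Int)) : List (List Int) :=
  (possib.map (fun p => p ++ [2])) ++ (possib.map (fun p => p ++ [3]))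

def possib_k (k : Int) : List (List Int) :=
  if k = 0 then []
  else if k = 1 then [[2],[3]]
  else (PySem.List.pyRange 0 (k-1) 1).foldl (fun possib _ => pvStep possib) [[2],[3]]

-- ===== PORT B =====
def possib_k_alt (k : Int) : List (List Int) :=
  if k = 0 then []
  else if k ≤ 1 then [[2],[3]]
  else ([2, 3] : List Int).flatMap (fun last => (possib_k_alt (k-1)).map (· ++ [last]))
termination_by k.toNat
decreasing_by omega

-- ===== PRECONDITION & SPEC =====
def Spec_possib_k (k : Int) (out : List (List Int)) : Prop := out = possib_k_alt k
instance (k : Int) (out : List (List Int)) : Decidable (Spec_possib_k k out) := by unfold Spec_possib_k; infer_instance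

-- ===== CLAIM (what is proved, stated in full; the proofs are below) =====
def Claim_equal_possib_k : Prop := ∀ (k : Int), Dom_possib_k k → Spec_possib_k k (possib_k k)

-- ===== LEMMAS AND PROOFS =====

theorem pvFoldl_iterate (l : List Int) (init : List (List Int)) :
    l.foldl (fun p _ => pvStep p) init = pvStep^[l.length] init := by
  induction l generalizing init with
  | nil => rfl
  | cons a t ih => simp [List.foldl_cons, ih, Function.iterate_succ_apply]

theorem pvAlt_succ (k : Int) (hk : 2 ≤ k) :
    possib_k_alt k = pvStep (possib_k_alt (k-1)) := by
  rw [possib_k_alt, if_neg (by omega), if_neg (by omega)]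
  simp [pvStep, List.flatMap]

theorem pvAlt_iterate (m : Nat) :
    possib_k_alt ((m : Int) + 1) = pvStep^[m] [[2],[3]] := by
  induction m with
  | zero => rw [possib_k_alt]; norm_num
  | succ m ih =>
      rw [Function.iterate_succ_apply', ← ih]
      have h : ((m + 1 : Nat) : Int) + 1 - 1 = (m : Int) + 1 := by push_cast; ring
      rw [pvAlt_succ _ (by push_cast; omega), h]

-- ===== VERDICT (by name: the statement is the Claim_ definition above) =====
theorem possib_k_spec : Claim_equal_possib_k := by
  intro k _
  unfold Spec_possib_k possib_k
  by_cases h0 : k = 0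
  · rw [if_pos h0, possib_k_alt, if_pos h0]
  · rw [if_neg h0]
    by_cases h1 : k = 1
    · rw [if_pos h1, possib_k_alt]
      simp [h1]
    · rw [if_neg h1]
      by_cases h2 : k ≤ 1
      · -- k < 0 : the loop range is empty and A returns the seed; B hits its base case
        rw [PySem.List.pyRange_one_eq_nil (by omega), possib_k_alt,
          if_neg h0, if_pos h2]
        rfl
      · -- k ≥ 2
        rw [pvFoldl_iterate, PySem.List.length_pyRange_one]
        have hm : k = ((k - 1).toNat : Int) + 1 := by omega
        have hlen : (k - 1 - 0).toNat = (k - 1).toNat := by omega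
        rw [hlen, ← pvAlt_iterate, ← hm]
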